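-- pv_equiv track=rewrite | github.com/red-hat-storage/ocs-ci | ocs_ci/ocs/platform_nodes.py | get_available_slots
-- ===== SOURCE A (Python) =====
-- def get_available_slots(existing_indexes, required_slots):
--     """
--     Get indexes which are free
--
--     Args:
--         existing_indexes (list): of integers
--         required_slots (int): required number of integers
--
--     Returns:
--         list: of integers (available slots)
--
--     """
--     slots_available = []
--     count = 0
--     index = 0
--
--     while count < required_slots:
--         if index not in existing_indexes:
--             slots_available.append(index)
--             count = count + 1
--         index = index + 1
--     return slots_available
-- ===== SOURCE B (Python) =====
-- def get_available_slots(existing_indexes, required_slots):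
--     """Sort the blocked indexes once and fill the gaps in a single pass."""
--     slots_available = []
--     next_candidate = 0
--     for blocked in sorted(existing_indexes):
--         if len(slots_available) >= required_slots:
--             break
--         if blocked < next_candidate:
--             continue
--         while next_candidate < blocked and len(slots_available) < required_slots:
--             slots_available.append(next_candidate)
--             next_candidate += 1
--         next_candidate = blocked + 1
--     while len(slots_available) < required_slots:
--         slots_available.append(next_candidate)
--         next_candidate += 1
--     return slots_available
-- ===== Notes on version B (the rewrite author's own statement) =====
-- stated objective: faster
-- what changed: A probes every candidate 0,1,2,... with a linear membership scan of existing_indexes; B sorts existing_indexes once and collects the free integers by filling the gaps between consecutive sorted blocked values in a single pass.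
import Mathlib
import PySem

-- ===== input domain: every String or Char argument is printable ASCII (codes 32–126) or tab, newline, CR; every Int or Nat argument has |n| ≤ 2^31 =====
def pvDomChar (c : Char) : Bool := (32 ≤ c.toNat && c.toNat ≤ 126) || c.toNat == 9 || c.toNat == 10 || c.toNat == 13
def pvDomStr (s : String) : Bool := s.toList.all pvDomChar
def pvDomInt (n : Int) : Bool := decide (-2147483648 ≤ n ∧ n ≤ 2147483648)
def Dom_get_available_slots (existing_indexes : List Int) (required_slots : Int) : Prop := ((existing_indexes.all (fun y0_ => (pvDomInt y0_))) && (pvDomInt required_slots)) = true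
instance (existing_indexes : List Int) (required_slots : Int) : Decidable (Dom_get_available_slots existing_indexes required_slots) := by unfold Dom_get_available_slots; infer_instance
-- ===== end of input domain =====

-- B replaces A's per-candidate membership scan by sorting the blocked indexes once and
-- filling the gaps below/above them in a single pass.

-- ===== PORT A =====
-- the while loop of A: state (slots_available = acc, count, index); the Nat argument is an
-- exact upper bound on the remaining iterations (a totality guard only, proved sufficient below)
def aloop (ex : List Int) (rs : Int) : Nat → List Int → Int → Int → List Int
  | 0, acc, _, _ => acc
  | fuel + 1, acc, count, index =>
    if count < rs then
      if ex.contains index then aloop ex rs fuel acc count (index + 1)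
      else aloop ex rs fuel (acc ++ [index]) (count + 1) (index + 1)
    else acc

def get_available_slots (existing_indexes : List Int) (required_slots : Int) : List Int :=
  aloop existing_indexes required_slots (required_slots.toNat + existing_indexes.length) [] 0 0

-- ===== PORT B =====
-- inner while loop of B: emit the free gap below `b` while capacity remains
-- (the Nat argument counts the candidates strictly below b — the loop's exact trip bound)
def bgapAux (rs b : Int) : Nat → List Int → Int → List Int × Int
  | 0, out, next => (out, next)
  | g + 1, out, next =>
    if next < b ∧ (out.length : Int) < rs then bgapAux rs b g (out ++ [next]) (next + 1)
    else (out, next)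

def bgap (rs b : Int) (out : List Int) (next : Int) : List Int × Int :=
  bgapAux rs b (b - next).toNat out next

-- the for loop of B over the sorted blocked values (with its break / continue)
def bfold (rs : Int) (s : List Int) (out : List Int) (next : Int) : List Int × Int :=
  match s with
  | [] => (out, next)
  | b :: s' =>
    if rs ≤ (out.length : Int) then (out, next)
    else if b < next then bfold rs s' out next
    else bfold rs s' (bgap rs b out next).1 (b + 1)

-- trailing while loop of B: consecutive integers until enough slots (Nat = remaining slots)
def bfillAux (rs : Int) : Nat → List Int → Int → List Int
  | 0, out, _ => out
  | m + 1, out, next =>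
    if (out.length : Int) < rs then bfillAux rs m (out ++ [next]) (next + 1)
    else out

def bfill (rs : Int) (out : List Int) (next : Int) : List Int :=
  bfillAux rs (rs - out.length).toNat out next

def get_available_slots_alt (existing_indexes : List Int) (required_slots : Int) : List Int :=
  bfill required_slots
    (bfold required_slots (PySem.List.sorted existing_indexes (fun x => x) false) [] 0).1
    (bfold required_slots (PySem.List.sorted existing_indexes (fun x => x) false) [] 0).2

-- ===== PRECONDITION & SPEC =====
def Spec_get_available_slots (existing_indexes : List Int) (required_slots : Int) (out : List Int) : Prop := out = get_available_slots_alt existing_indexes required_slots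
instance (existing_indexes : List Int) (required_slots : Int) (out : List Int) : Decidable (Spec_get_available_slots existing_indexes required_slots out) := by unfold Spec_get_available_slots; infer_instance

-- ===== CLAIM (what is proved, stated in full; the proofs are below) =====
def Claim_equal_get_available_slots : Prop := ∀ (existing_indexes : List Int) (required_slots : Int), Dom_get_available_slots existing_indexes required_slots → Spec_get_available_slots existing_indexes required_slots (get_available_slots existing_indexes required_slots)

-- ===== LEMMAS AND PROOFS =====

-- number of blocked values at or above i (decreases along the scans; drives freeSeq's termination)
def blkAfter (ex : List Int) (i : Int) : Nat := (ex.filter (fun e => i ≤ e)).length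

theorem blkAfter_succ_le (ex : List Int) (i : Int) : blkAfter ex (i + 1) ≤ blkAfter ex i := by
  induction ex with
  | nil => exact Nat.le.refl
  | cons h t ih =>
    unfold blkAfter at ih ⊢
    rw [List.filter_cons, List.filter_cons]
    by_cases h1 : (i + 1 ≤ h)
    · rw [if_pos (decide_eq_true h1), if_pos (decide_eq_true (show i ≤ h by omega))]
      exact Nat.succ_le_succ ih
    · rw [if_neg (by simpa using h1)]
      by_cases h2 : i ≤ h
      · rw [if_pos (decide_eq_true h2)]
        exact le_trans ih (Nat.le_succ _)
      · rw [if_neg (by simpa using h2)]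
        exact ih

theorem blkAfter_succ_lt (ex : List Int) (i : Int) (hm : i ∈ ex) :
    blkAfter ex (i + 1) < blkAfter ex i := by
  induction ex with
  | nil => simp at hm
  | cons h t ih =>
    unfold blkAfter
    rw [List.filter_cons, List.filter_cons]
    rcases List.mem_cons.mp hm with rfl | hm'
    · rw [if_neg (by simpa using (show ¬ (i + 1 ≤ i) by omega)), if_pos (decide_eq_true (le_refl i))]
      have h0 := blkAfter_succ_le t i
      unfold blkAfter at h0
      exact Nat.lt_succ_of_le h0
    · have ih' := ih hm'
      unfold blkAfter at ih'
      by_cases h1 : i + 1 ≤ h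
      · rw [if_pos (decide_eq_true h1), if_pos (decide_eq_true (show i ≤ h by omega))]
        exact Nat.succ_lt_succ ih'
      · rw [if_neg (by simpa using h1)]
        by_cases h2 : i ≤ h
        · rw [if_pos (decide_eq_true h2)]
          exact Nat.lt_succ_of_lt ih'
        · rw [if_neg (by simpa using h2)]
          exact ih'


-- reference: the first n integers ≥ i that are not blocked
def freeSeq (ex : List Int) (n : Nat) (i : Int) : List Int :=
  match n with
  | 0 => []
  | m + 1 =>
    if hc : ex.contains i then freeSeq ex (m + 1) (i + 1)
    else i :: freeSeq ex m (i + 1)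
termination_by (n, blkAfter ex i)
decreasing_by
  · exact Prod.Lex.right _ (blkAfter_succ_lt ex i (by simpa using hc))
  · exact Prod.Lex.left _ _ (by omega)

theorem freeSeq_zero (ex : List Int) (i : Int) : freeSeq ex 0 i = [] := by
  rw [freeSeq]

theorem freeSeq_succ_mem (ex : List Int) (i : Int) (hc : ex.contains i = true) (k : Nat) :
    freeSeq ex (k + 1) i = freeSeq ex (k + 1) (i + 1) := by
  rw [freeSeq, dif_pos hc]

theorem freeSeq_succ_free (ex : List Int) (i : Int) (hc : ¬ ex.contains i = true) (k : Nat) :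
    freeSeq ex (k + 1) i = i :: freeSeq ex k (i + 1) := by
  rw [freeSeq, dif_neg hc]

-- [i, i+1, ..., i+m-1]
def consec : Nat → Int → List Int
  | 0, _ => []
  | m + 1, i => i :: consec m (i + 1)

theorem consec_length (m : Nat) (i : Int) : (consec m i).length = m := by
  induction m generalizing i with
  | zero => rfl
  | succ k ih => simp [consec, ih]

theorem blkAfter_le_length (ex : List Int) (i : Int) : blkAfter ex i ≤ ex.length :=
  List.length_filter_le _ _

theorem aloop_eq (ex : List Int) (rs : Int) (fuel : Nat) (acc : List Int) (count index : Int)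
    (hf : (rs - count).toNat + blkAfter ex index ≤ fuel) :
    aloop ex rs fuel acc count index = acc ++ freeSeq ex (rs - count).toNat index := by
  induction fuel generalizing acc count index with
  | zero =>
    rw [show (rs - count).toNat = 0 from by omega, freeSeq_zero]
    simp [aloop]
  | succ f ih =>
    rw [aloop]
    by_cases h : count < rs
    · rw [if_pos h]
      by_cases hc : ex.contains index = true
      · rw [if_pos hc]
        have hmem : index ∈ ex := by simpa using hc
        have hblk := blkAfter_succ_lt ex index hmem
        rw [ih acc count (index + 1) (by omega)]
        obtain ⟨k, hk⟩ : ∃ k, (rs - count).toNat = k + 1 := ⟨(rs - count).toNat - 1, by omega⟩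
        rw [hk, freeSeq_succ_mem ex index hc k]
      · rw [if_neg hc]
        have hblk := blkAfter_succ_le ex index
        rw [ih (acc ++ [index]) (count + 1) (index + 1) (by omega)]
        obtain ⟨k, hk⟩ : ∃ k, (rs - count).toNat = k + 1 := ⟨(rs - count).toNat - 1, by omega⟩
        rw [hk, freeSeq_succ_free ex index hc k,
            show (rs - (count + 1)).toNat = k from by omega]
        simp
    · rw [if_neg h, show (rs - count).toNat = 0 from by omega, freeSeq_zero]
      simp

theorem bfillAux_eq (m : Nat) (rs : Int) (out : List Int) (next : Int)
    (hm : (rs - out.length).toNat = m) :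
    bfillAux rs m out next = out ++ consec m next := by
  induction m generalizing out next with
  | zero => simp [bfillAux, consec]
  | succ k ih =>
    rw [bfillAux, if_pos (show (out.length : Int) < rs by omega)]
    rw [ih (out ++ [next]) (next + 1) (by simp; omega)]
    simp [consec]

theorem bfill_eq (rs : Int) (out : List Int) (next : Int) :
    bfill rs out next = out ++ consec (rs - out.length).toNat next :=
  bfillAux_eq _ rs out next rfl

theorem bgapAux_eq (g : Nat) (rs b : Int) (out : List Int) (next : Int)
    (hg : (b - next).toNat = g) :
    bgapAux rs b g out next =
      (out ++ consec (min (rs - out.length).toNat g) next,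
       next + min (rs - out.length).toNat g) := by
  induction g generalizing out next with
  | zero => simp [bgapAux, consec]
  | succ k ih =>
    by_cases hlen : (out.length : Int) < rs
    · rw [bgapAux, if_pos ⟨by omega, hlen⟩]
      rw [ih (out ++ [next]) (next + 1) (by omega)]
      have hmin : min (rs - (out.length : Int)).toNat (k + 1)
          = min (rs - ((out ++ [next]).length : Int)).toNat k + 1 := by
        simp only [List.length_append, List.length_cons, List.length_nil]
        push_cast
        omega
      rw [hmin]
      simp [consec]
      omega
    · rw [bgapAux, if_neg (by omega)]
      rw [show (rs - (out.length : Int)).toNat = 0 from by omega]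
      simp [consec]

theorem bgap_eq (rs b : Int) (out : List Int) (next : Int) :
    bgap rs b out next =
      (out ++ consec (min (rs - out.length).toNat (b - next).toNat) next,
       next + min (rs - out.length).toNat (b - next).toNat) :=
  bgapAux_eq _ rs b out next rfl

theorem freeSeq_skip (ex : List Int) (b : Int) (hb : b ∈ ex) (m : Nat) :
    freeSeq ex m b = freeSeq ex m (b + 1) := by
  cases m with
  | zero => rw [freeSeq_zero, freeSeq_zero]
  | succ k => exact freeSeq_succ_mem ex b (by simpa using hb) k

theorem freeSeq_gap (g : Nat) (ex : List Int) (b : Int) (m : Nat) (next : Int)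
    (hg : (b - next).toNat = g) (hle : next ≤ b)
    (hclear : ∀ x, next ≤ x → x < b → x ∉ ex) (hb : b ∈ ex) :
    freeSeq ex m next = consec (min m g) next ++ freeSeq ex (m - min m g) (b + 1) := by
  induction g generalizing m next with
  | zero =>
    have : next = b := by omega
    subst this
    simp [consec, freeSeq_skip ex next hb m]
  | succ k ih =>
    have hnb : next < b := by omega
    cases m with
    | zero => simp [freeSeq_zero, consec]
    | succ j =>
      have hcf : ¬ ex.contains next = true := by
        simp only [List.contains_iff_mem]
        exact hclear next le_rfl hnb
      rw [freeSeq_succ_free ex next hcf j]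
      rw [ih j (next + 1) (by omega) (by omega) (fun x hx hx2 => hclear x (by omega) hx2)]
      rw [show min (j + 1) (k + 1) = min j k + 1 from by omega,
          show (j + 1) - (min j k + 1) = j - min j k from by omega]
      simp [consec]

theorem freeSeq_noblock (m : Nat) (ex : List Int) (next : Int)
    (h : ∀ x, next ≤ x → x ∉ ex) :
    freeSeq ex m next = consec m next := by
  induction m generalizing next with
  | zero => rw [freeSeq_zero]; rfl
  | succ k ih =>
    have hcf : ¬ ex.contains next = true := by
      simp only [List.contains_iff_mem]
      exact h next le_rfl
    rw [freeSeq_succ_free ex next hcf k]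
    rw [ih (next + 1) (fun x hx => h x (by omega))]
    rfl

theorem bmain (s : List Int) (ex : List Int) (rs : Int) (out : List Int) (next : Int)
    (hs : s.Pairwise (· ≤ ·))
    (hinv : ∀ x, next ≤ x → (x ∈ ex ↔ x ∈ s)) :
    bfill rs (bfold rs s out next).1 (bfold rs s out next).2 =
      out ++ freeSeq ex (rs - out.length).toNat next := by
  induction s generalizing out next with
  | nil =>
    simp only [bfold]
    rw [bfill_eq rs out next,
        freeSeq_noblock _ ex next (fun x hx hmem => by simpa using (hinv x hx).mp hmem)]
  | cons b s' ih =>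
    rw [List.pairwise_cons] at hs
    obtain ⟨hbs, hs'⟩ := hs
    simp only [bfold]
    by_cases h1 : rs ≤ (out.length : Int)
    · rw [if_pos h1]
      simp only
      rw [bfill_eq rs out next,
          show (rs - (out.length : Int)).toNat = 0 from by omega, freeSeq_zero]
      simp [consec]
    · rw [if_neg h1]
      by_cases h2 : b < next
      · rw [if_pos h2]
        exact ih out next hs' (fun x hx => by
          rw [hinv x hx, List.mem_cons]
          constructor
          · rintro (rfl | hm)
            · omega
            · exact hm
          · exact Or.inr)
      · rw [if_neg h2]
        have hnb : next ≤ b := by omega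
        rw [bgap_eq rs b out next]
        have hbex : b ∈ ex := (hinv b hnb).mpr (List.mem_cons_self)
        have hclear : ∀ x, next ≤ x → x < b → x ∉ ex := by
          intro x hx hxb hmem
          rcases List.mem_cons.mp ((hinv x hx).mp hmem) with rfl | hm
          · omega
          · exact absurd (hbs x hm) (by omega)
        have hinv' : ∀ x, b + 1 ≤ x → (x ∈ ex ↔ x ∈ s') := by
          intro x hx
          rw [hinv x (by omega), List.mem_cons]
          constructor
          · rintro (rfl | hm)
            · omega
            · exact hm
          · exact Or.inr
        rw [ih (out ++ consec (min (rs - (out.length : Int)).toNat (b - next).toNat) next) (b + 1) hs' hinv']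
        rw [freeSeq_gap (b - next).toNat ex b (rs - (out.length : Int)).toNat next rfl hnb hclear hbex]
        have hlen : (((out ++ consec (min (rs - (out.length : Int)).toNat (b - next).toNat) next).length : Int))
            = (out.length : Int) + min (rs - (out.length : Int)).toNat (b - next).toNat := by
          simp [consec_length]
        rw [show (rs - ((out ++ consec (min (rs - (out.length : Int)).toNat (b - next).toNat) next).length : Int)).toNat
            = (rs - (out.length : Int)).toNat - min (rs - (out.length : Int)).toNat (b - next).toNat from by rw [hlen]; omega]
        simp

-- ===== VERDICT (by name: the statement is the Claim_ definition above) =====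
theorem get_available_slots_spec : Claim_equal_get_available_slots := by
  intro ex rs _hdom
  unfold Spec_get_available_slots get_available_slots get_available_slots_alt
  rw [aloop_eq ex rs (rs.toNat + ex.length) [] 0 0
        (by have := blkAfter_le_length ex 0; omega),
      bmain (PySem.List.sorted ex (fun x => x) false) ex rs [] 0
        (by simpa using PySem.List.sorted_pairwise ex (fun x => x))
        (fun x _ => (PySem.List.mem_sorted ex (fun x => x) false x).symm)]
  simp
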